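-- pv_equiv track=rewrite | github.com/WD8844/Project-PMBW-TEXT-experiment | FreetypeMakeFonts.py | divedeCmb
-- ===== SOURCE A (Python) =====
-- def divedeCmb(cmb,bpp):#将经由combineBytes处理后的列表还原为单Byte列表
--     buffer = []
--     Bn = 2*bpp
--     Bn += 1#保证右移次数
--     for i in range(len(cmb)):
--         Blist = []
--         for j in range(Bn):
--             if (Bn - 2 - j) < 0:#到负数就跳出，总右移次数刚好是2*bpp次
--                 break
--             B = (cmb[i] >> 8*(Bn - 2 - j)) & 0xFF#右移8的倍数，最后一次(Bn - 2 - j)是0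
--             Blist.append(B)
--         buffer.extend(Blist)
--     return buffer
-- ===== SOURCE B (Python) =====
-- def divedeCmb(cmb, bpp):
--     # Closed-form big-endian byte packing per element instead of the
--     # shift-and-mask inner loop.
--     n = 2 * bpp
--     if n <= 0:
--         return []
--     mask = (1 << (8 * n)) - 1
--     out = bytearray()
--     for x in cmb:
--         out += (x & mask).to_bytes(n, 'big')
--     return list(out)
-- ===== Notes on version B (the rewrite author's own statement) =====
-- stated objective: faster
-- what changed: Replaces the nested Python-level MSB-first shift-and-mask inner loop (with its break-driven count) by masking each element once and emitting its 2*bpp big-endian bytes with a single int.to_bytes call into a bytearray.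
import Mathlib
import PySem

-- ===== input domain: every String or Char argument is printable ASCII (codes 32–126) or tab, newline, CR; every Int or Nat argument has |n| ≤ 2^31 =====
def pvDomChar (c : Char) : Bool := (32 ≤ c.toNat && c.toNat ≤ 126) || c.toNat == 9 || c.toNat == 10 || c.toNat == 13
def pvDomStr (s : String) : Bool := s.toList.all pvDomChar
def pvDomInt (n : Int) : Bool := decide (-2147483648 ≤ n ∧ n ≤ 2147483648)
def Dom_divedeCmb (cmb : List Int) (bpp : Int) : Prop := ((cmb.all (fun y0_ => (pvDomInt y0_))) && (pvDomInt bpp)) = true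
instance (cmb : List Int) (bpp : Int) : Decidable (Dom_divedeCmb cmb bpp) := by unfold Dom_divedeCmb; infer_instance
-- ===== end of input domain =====

-- B replaces A's break-driven MSB-first shift-and-mask inner loop by masking each
-- element and emitting its 2*bpp big-endian bytes in one closed-form int.to_bytes
-- packing step (same asymptotics; measured constant-factor speedup in Python).

-- ===== PORT A =====
-- the inner 'for j in range(Bn)' loop with its break, building Blist;
-- in the non-break branch 8*(Bn-2-j) is nonnegative, so .toNat is exact there
def divedeCmbInner (x Bn : Int) : List Int → List Int
  | [] => []
  | j :: js =>
    if Bn - 2 - j < 0 then []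
    else PySem.Int.band (x >>> (8 * (Bn - 2 - j)).toNat) 255 :: divedeCmbInner x Bn js

def divedeCmb (cmb : List Int) (bpp : Int) : List Int :=
  -- Bn = 2*bpp; Bn += 1 inlined as 2*bpp+1
  (PySem.List.pyRange 0 (cmb.length : Int) 1).foldl
    (fun buffer i =>
      buffer ++ divedeCmbInner (PySem.List.pyGetD cmb i 0) (2*bpp+1)
        (PySem.List.pyRange 0 (2*bpp+1) 1)) []

-- ===== PORT B =====
-- hand port of v.to_bytes(n, 'big') (no PySem primitive): big-endian digits by
-- repeated division; exact for the masked (nonnegative) v fed to it, where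
-- Lean's ediv/emod agree with Python's divmod
def divedeCmbToBytesBE : Nat → Int → List Int
  | 0, _ => []
  | n + 1, v => divedeCmbToBytesBE n (v / 256) ++ [v % 256]

def divedeCmb_alt (cmb : List Int) (bpp : Int) : List Int :=
  if 2*bpp ≤ 0 then []
  else
    cmb.foldl (fun out x =>
      out ++ divedeCmbToBytesBE (2*bpp).toNat
        (PySem.Int.band x (((1:Int) <<< (8*(2*bpp)).toNat) - 1))) []

-- ===== PRECONDITION & SPEC =====
def Spec_divedeCmb (cmb : List Int) (bpp : Int) (out : List Int) : Prop := out = divedeCmb_alt cmb bpp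
instance (cmb : List Int) (bpp : Int) (out : List Int) : Decidable (Spec_divedeCmb cmb bpp out) := by unfold Spec_divedeCmb; infer_instance

-- ===== CLAIM (what is proved, stated in full; the proofs are below) =====
def Claim_equal_divedeCmb : Prop := ∀ (cmb : List Int) (bpp : Int), Dom_divedeCmb cmb bpp → Spec_divedeCmb cmb bpp (divedeCmb cmb bpp)

-- ===== LEMMAS AND PROOFS =====

-- Python x & (2^k - 1) is x mod 2^k (also for negative x)
theorem pv_neg_emod (N q r : Int) (h0 : 0 ≤ r) (h1 : r < N) :
    (-(N*q + r) - 1) % N = N - 1 - r := by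
  have h3 : (-(N*q + r) - 1) = (N - 1 - r) + N * (-q - 1) := by ring
  rw [h3, Int.add_mul_emod_self_left, Int.emod_eq_of_lt (by omega) (by omega)]

theorem pv_band_mask (x : Int) (k : Nat) :
    PySem.Int.band x (2 ^ k - 1) = x % (2 ^ k : Int) := by
  have hcast : ((2:Int) ^ k) = ((2 ^ k : Nat) : Int) := by push_cast; ring
  have hpos : (0:Nat) < 2 ^ k := by positivity
  unfold PySem.Int.band
  by_cases hx : 0 ≤ x
  · rw [if_pos hx, if_pos (by omega)]
    have h1 : ((2:Int) ^ k - 1).toNat = 2 ^ k - 1 := by omega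
    rw [h1, Nat.and_two_pow_sub_one_eq_mod, Int.natCast_emod, Int.toNat_of_nonneg hx]
    push_cast
    ring
  · rw [if_neg hx, if_pos (by omega)]
    set y := (-x - 1).toNat with hy
    have hxy : x = -((y:Int)) - 1 := by omega
    have h1 : ((2:Int) ^ k - 1).toNat = 2 ^ k - 1 := by omega
    rw [h1, Nat.and_comm, Nat.and_two_pow_sub_one_eq_mod]
    have hdm := Nat.div_add_mod y (2 ^ k)
    have hdmi : (y:Int) = (2:Int) ^ k * ((y / 2 ^ k : Nat) : Int) + ((y % 2 ^ k : Nat) : Int) := by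
      exact_mod_cast hdm.symm
    have hx2 : x = -((2:Int) ^ k * (y / 2 ^ k : Nat) + ((y % 2 ^ k : Nat) : Int)) - 1 := by
      rw [hxy, hdmi]
    rw [hx2, pv_neg_emod _ _ _ (Int.natCast_nonneg _) (by rw [hcast]; exact_mod_cast Nat.mod_lt y hpos)]
    omega

-- (x mod 256*M) / 256 = (x/256) mod M
theorem pv_emod_mul_ediv (x M : Int) (hM : 0 < M) :
    x % (256 * M) / 256 = x / 256 % M := by
  have h0 : 256 * (x / 256) + x % 256 = x := Int.mul_ediv_add_emod x 256
  have hr0 : 0 ≤ x % 256 := Int.emod_nonneg x (by norm_num)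
  have hr1 : x % 256 < 256 := Int.emod_lt_of_pos x (by norm_num)
  have h1 : M * (x / 256 / M) + x / 256 % M = x / 256 := Int.mul_ediv_add_emod (x / 256) M
  have hm0 : 0 ≤ x / 256 % M := Int.emod_nonneg _ (by omega)
  have hm1 : x / 256 % M < M := Int.emod_lt_of_pos _ hM
  have hx : x = (256 * (x / 256 % M) + x % 256) + (256 * M) * (x / 256 / M) := by
    linear_combination - h0 - 256 * h1
  nth_rewrite 1 [hx]
  rw [Int.add_mul_emod_self_left,
      Int.emod_eq_of_lt (by nlinarith) (by nlinarith)]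
  have hsw : 256 * (x / 256 % M) + x % 256 = x % 256 + 256 * (x / 256 % M) := by ring
  rw [hsw, Int.add_mul_ediv_left _ _ (by norm_num : (256:Int) ≠ 0),
      Int.ediv_eq_zero_of_lt hr0 hr1, zero_add]

-- the MSB-first byte list A's inner loop produces
def pvF (n : Nat) (x : Int) : List Int :=
  (List.range n).map (fun j => PySem.Int.band (x >>> (8 * (n - 1 - j))) 255)

theorem pv_shift8 (x : Int) (m : Nat) : (x >>> (8:Nat)) >>> m = x >>> (8 + m) := by
  rw [Int.shiftRight_eq_div_pow, Int.shiftRight_eq_div_pow, Int.shiftRight_eq_div_pow,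
      Int.ediv_ediv_of_nonneg (by positivity)]
  congr 1
  push_cast [pow_add]
  ring

theorem pvF_succ (n : Nat) (x : Int) :
    pvF (n+1) x = pvF n (x >>> (8:Nat)) ++ [PySem.Int.band x 255] := by
  unfold pvF
  rw [List.range_succ, List.map_append]
  congr 1
  · apply List.map_congr_left
    intro j hj
    rw [List.mem_range] at hj
    rw [pv_shift8]
    congr 2
    omega
  · simp [Int.shiftRight_zero]

theorem pvF_eq_toBytes (n : Nat) (x : Int) :
    pvF n x = divedeCmbToBytesBE n (PySem.Int.band x (2 ^ (8*n) - 1)) := by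
  induction n generalizing x with
  | zero => rfl
  | succ n ih =>
    rw [pvF_succ, ih, divedeCmbToBytesBE]
    have hsplit : ((2:Int) ^ (8*(n+1))) = 256 * 2 ^ (8*n) := by
      have : 8*(n+1) = 8*n + 8 := by ring
      rw [this, pow_add]; ring
    congr 1
    · congr 1
      rw [pv_band_mask, pv_band_mask, hsplit,
          pv_emod_mul_ediv x (2 ^ (8*n)) (by positivity)]
      congr 1
      rw [Int.shiftRight_eq_div_pow]
      norm_num
    · have h255 : (255:Int) = 2 ^ (8:Nat) - 1 := by norm_num
      rw [h255, pv_band_mask, pv_band_mask]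
      have hdvd : (256:Int) ∣ 2 ^ (8*(n+1)) := ⟨2 ^ (8*n), hsplit⟩
      rw [Int.emod_emod_of_dvd x hdvd]
      norm_num

-- the break-driven inner loop over range(Bn) is a map over range(Bn-1)
theorem pv_inner_range (m : Nat) (x : Int) : ∀ (a Bn : Int), a + m = Bn - 1 →
    divedeCmbInner x Bn (PySem.List.pyRange a Bn 1) =
      (PySem.List.pyRange a (Bn-1) 1).map
        (fun j => PySem.Int.band (x >>> (8*(Bn-2-j)).toNat) 255) := by
  induction m with
  | zero =>
    intro a Bn h
    have hBn : Bn = a + 1 := by omega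
    subst hBn
    rw [PySem.List.pyRange_one_singleton]
    have hnil : PySem.List.pyRange a (a+1-1) 1 = [] :=
      PySem.List.pyRange_one_eq_nil (by omega)
    rw [hnil]
    simp [divedeCmbInner, show a + 1 - 2 - a < 0 from by omega]
  | succ m ih =>
    intro a Bn h
    rw [PySem.List.pyRange_one_cons (by omega : a < Bn)]
    simp only [divedeCmbInner]
    rw [if_neg (by omega), ih (a+1) Bn (by omega),
        PySem.List.pyRange_one_cons (by omega : a < Bn - 1), List.map_cons]

theorem pv_map_range_eq_pvF (n : Nat) (x : Int) :
    (PySem.List.pyRange 0 (n:Int) 1).map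
      (fun j => PySem.Int.band (x >>> (8*((n:Int)-1-j)).toNat) 255) = pvF n x := by
  rw [PySem.List.pyRange_one, List.map_map]
  have hto : ((n:Int) - 0).toNat = n := by omega
  rw [hto]
  unfold pvF
  apply List.map_congr_left
  intro k hk
  rw [List.mem_range] at hk
  simp only [Function.comp]
  congr 2
  omega

theorem pv_inner_nil (x Bn : Int) (h : Bn ≤ 1) :
    divedeCmbInner x Bn (PySem.List.pyRange 0 Bn 1) = [] := by
  by_cases h0 : Bn ≤ 0
  · rw [PySem.List.pyRange_one_eq_nil h0]
    rfl
  · have h1 : Bn = 1 := by omega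
    subst h1
    have hs := PySem.List.pyRange_one_singleton 0
    norm_num at hs
    rw [hs]
    simp [divedeCmbInner]

-- per-element equality for bpp ≥ 1
theorem pv_elem (bpp : Int) (hb : 0 < 2*bpp) (x : Int) :
    divedeCmbInner x (2*bpp+1) (PySem.List.pyRange 0 (2*bpp+1) 1) =
      divedeCmbToBytesBE (2*bpp).toNat
        (PySem.Int.band x (((1:Int) <<< (8*(2*bpp)).toNat) - 1)) := by
  have hn : ((2*bpp).toNat : Int) = 2*bpp := Int.toNat_of_nonneg (by omega)
  set n := (2*bpp).toNat with hdefn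
  have hBn : 2*bpp + 1 = (n:Int) + 1 := by omega
  rw [hBn, pv_inner_range n x 0 ((n:Int)+1) (by omega)]
  have h1 : ((n:Int) + 1 - 1) = (n:Int) := by ring
  have h2 : ∀ j : Int, ((n:Int) + 1 - 2 - j) = (n:Int) - 1 - j := by intro j; ring
  simp only [h1, h2]
  rw [pv_map_range_eq_pvF, pvF_eq_toBytes]
  congr 2
  rw [Int.shiftLeft_eq]
  have h3 : (8*(2*bpp)).toNat = 8*n := by omega
  rw [h3]; ring

-- ===== VERDICT (by name: the statement is the Claim_ definition above) =====
theorem divedeCmb_spec : Claim_equal_divedeCmb := by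
  intro cmb bpp _
  unfold Spec_divedeCmb divedeCmb divedeCmb_alt
  by_cases hb : 2*bpp ≤ 0
  · rw [if_pos hb, PySem.List.foldl_append_eq_flatMap, List.nil_append,
        List.flatMap_eq_nil_iff.mpr]
    intro i _
    exact pv_inner_nil _ _ (by omega)
  · rw [if_neg hb]
    rw [PySem.List.foldl_pyRange_zero_pyGetD' cmb 0
          (fun acc x => acc ++ divedeCmbInner x (2*bpp+1) (PySem.List.pyRange 0 (2*bpp+1) 1)) [],
        PySem.List.foldl_append_eq_flatMap, PySem.List.foldl_append_eq_flatMap,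
        List.nil_append, List.nil_append]
    simp only [pv_elem bpp (by omega)]
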